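-- pv_equiv track=rewrite | github.com/P3dro11/CodeSignal | sortbyHeight.py | solution
-- ===== SOURCE A (Python) =====
-- def solution(a):
--     tree = []
--     person = []
--
--     for i in range(len(a)):
--         if a[i] == -1:
--             tree.append(i)
--         else:
--             person.append(a[i])
--             person.sort()
--
--     for j in tree:
--         person.insert(j, -1)
--     return person
-- ===== SOURCE B (Python) =====
-- def solution(a):
--     it = iter(sorted(x for x in a if x != -1))
--     return [-1 if x == -1 else next(it) for x in a]
-- ===== Notes on version B (the rewrite author's own statement) =====
-- stated objective: simpler
-- what changed: B sorts the non-tree heights once and rebuilds the answer in a single forward pass pulling sorted values from an iterator, instead of A's re-sorting after every append and then inserting -1 at recorded tree indices.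
import Mathlib
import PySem

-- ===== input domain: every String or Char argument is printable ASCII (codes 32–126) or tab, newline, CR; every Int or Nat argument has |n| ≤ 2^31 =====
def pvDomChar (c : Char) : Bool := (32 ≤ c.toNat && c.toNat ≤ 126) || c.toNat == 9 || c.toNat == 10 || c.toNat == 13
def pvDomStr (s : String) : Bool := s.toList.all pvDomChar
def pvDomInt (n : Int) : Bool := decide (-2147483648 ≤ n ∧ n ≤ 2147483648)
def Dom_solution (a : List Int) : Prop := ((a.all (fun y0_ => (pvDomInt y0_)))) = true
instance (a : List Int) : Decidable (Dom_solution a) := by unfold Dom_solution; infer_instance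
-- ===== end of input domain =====

-- B replaces A's record-tree-indices / re-sort-after-every-append / insert-at-index strategy by one
-- sort of the non-tree heights followed by a single forward reconstruction pass (objective: simpler).

-- ===== PORT A =====
-- first loop: for i in range(len(a)): if a[i] == -1: tree.append(i) else: person.append(a[i]); person.sort()
-- second loop: for j in tree: person.insert(j, -1)
def solution (a : List Int) : List Int :=
  let st := (PySem.List.enumerate a 0).foldl
    (fun (st : List Int × List Int) ix =>
      if ix.2 = -1 then (st.1 ++ [ix.1], st.2)
      else (st.1, PySem.List.sorted (st.2 ++ [ix.2]) (fun x => x) false)) ([], [])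
  st.1.foldl (fun p j => PySem.List.insert p j (-1)) st.2

-- ===== PORT B =====
-- the list comprehension: -1 stays, otherwise pull the next element of the sorted iterator
-- (the [] branch of the match is Python's exhausted iterator; unreachable since the counts agree)
def pvMerge : List Int → List Int → List Int
  | [], _ => []
  | x :: xs, s =>
    if x = -1 then -1 :: pvMerge xs s
    else match s with
      | y :: ys => y :: pvMerge xs ys
      | [] => []

def solution_alt (a : List Int) : List Int :=
  pvMerge a (PySem.List.sorted (a.filter (fun x => x != -1)) (fun x => x) false)

-- ===== PRECONDITION & SPEC =====
def Spec_solution (a : List Int) (out : List Int) : Prop := out = solution_alt a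
instance (a : List Int) (out : List Int) : Decidable (Spec_solution a out) := by unfold Spec_solution; infer_instance

-- ===== CLAIM (what is proved, stated in full; the proofs are below) =====
def Claim_equal_solution : Prop := ∀ (a : List Int), Dom_solution a → Spec_solution a (solution a)

-- ===== LEMMAS AND PROOFS =====

-- tree indices of a, starting at offset i (what A's first loop accumulates in `tree`)
def pvTIdx : List Int → Int → List Int
  | [], _ => []
  | x :: xs, i => if x = -1 then i :: pvTIdx xs (i+1) else pvTIdx xs (i+1)

-- person list evolution of A's first loop
def pvPerson : List Int → List Int → List Int
  | [], p => p
  | x :: xs, p =>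
    if x = -1 then pvPerson xs p
    else pvPerson xs (PySem.List.sorted (p ++ [x]) (fun x => x) false)

theorem firstLoop_eq (a : List Int) : ∀ (i : Int) (t p : List Int),
    (PySem.List.enumerate a i).foldl
      (fun (st : List Int × List Int) ix =>
        if ix.2 = -1 then (st.1 ++ [ix.1], st.2)
        else (st.1, PySem.List.sorted (st.2 ++ [ix.2]) (fun x => x) false)) (t, p)
    = (t ++ pvTIdx a i, pvPerson a p) := by
  induction a with
  | nil => intro i t p; simp [PySem.List.enumerate_nil, pvTIdx, pvPerson]
  | cons x xs ih =>
    intro i t p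
    rw [PySem.List.enumerate_cons]
    by_cases hx : x = -1 <;>
      simp [List.foldl_cons, hx, pvTIdx, pvPerson, ih, List.append_assoc]

theorem person_eq (a : List Int) : ∀ (p q : List Int),
    p = PySem.List.sorted q (fun x => x) false →
    pvPerson a p = PySem.List.sorted (q ++ a.filter (fun x => x != -1)) (fun x => x) false := by
  induction a with
  | nil => intro p q h; simpa [pvPerson] using h
  | cons x xs ih =>
    intro p q h
    by_cases hx : x = -1
    · simp only [pvPerson, if_pos hx]
      rw [ih p q h]
      simp [hx]
    · simp only [pvPerson, if_neg hx]
      have hperm : (p ++ [x]).Perm (q ++ [x]) :=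
        List.Perm.append_right [x] (h ▸ PySem.List.sorted_perm q (fun x => x) false)
      have hs : PySem.List.sorted (p ++ [x]) (fun x => x) false
          = PySem.List.sorted (q ++ [x]) (fun x => x) false :=
        PySem.List.sorted_eq_sorted_of_perm _ _ _ (fun _ _ h => h) hperm
      rw [ih _ (q ++ [x]) hs]
      have hf : (x :: xs).filter (fun x => x != -1) = x :: xs.filter (fun x => x != -1) := by
        simp [hx]
      rw [hf, List.append_assoc]
      rfl

theorem ins_cons (p : List Int) (j : Int) (h : 0 ≤ j) (y v : Int) :
    PySem.List.insert (y :: p) (j+1) v = y :: PySem.List.insert p j v := by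
  simp only [PySem.List.insert, PySem.List.sliceIndices, List.length_cons]
  rw [if_neg (by omega), if_neg (by omega)]
  have : (min (j+1) ((p.length:Int)+1)).toNat = (min j (p.length:Int)).toNat + 1 := by omega
  simp only [Nat.cast_add, Nat.cast_one, this, List.take_succ_cons, List.drop_succ_cons,
    List.cons_append]
  norm_num
  rw [if_neg (by omega : ¬ j < 0)]

theorem tIdx_nonneg (a : List Int) : ∀ (i : Int), 0 ≤ i → ∀ j ∈ pvTIdx a i, 0 ≤ j := by
  induction a with
  | nil => intro i _ j hj; simp [pvTIdx] at hj
  | cons x xs ih =>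
    intro i hi j hj
    by_cases hx : x = -1 <;> simp [pvTIdx, hx] at hj
    · rcases hj with rfl | hj
      · exact hi
      · exact ih (i+1) (by omega) j hj
    · exact ih (i+1) (by omega) j hj

theorem foldl_ins_map_succ (t : List Int) : ∀ (s : List Int) (y : Int),
    (∀ j ∈ t, 0 ≤ j) →
    (t.map (· + 1)).foldl (fun p j => PySem.List.insert p j (-1)) (y :: s)
      = y :: t.foldl (fun p j => PySem.List.insert p j (-1)) s := by
  induction t with
  | nil => intro s y _; rfl
  | cons j t ih =>
    intro s y h
    simp only [List.map_cons, List.foldl_cons]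
    rw [ins_cons s j (h j (by simp)) y (-1)]
    exact ih _ y (fun j hj => h j (by simp [hj]))

theorem tIdx_shift (a : List Int) : ∀ (i : Int), pvTIdx a (i+1) = (pvTIdx a i).map (· + 1) := by
  induction a with
  | nil => intro i; rfl
  | cons x xs ih =>
    intro i
    by_cases hx : x = -1 <;> simp [pvTIdx, hx, ih]

theorem secondLoop_eq (a : List Int) : ∀ (s : List Int),
    s.length = (a.filter (fun x => x != -1)).length →
    (pvTIdx a 0).foldl (fun p j => PySem.List.insert p j (-1)) s = pvMerge a s := by
  induction a with
  | nil =>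
    intro s h
    simp at h
    simp [pvTIdx, h, pvMerge]
  | cons x xs ih =>
    intro s h
    by_cases hx : x = -1
    · have ht : pvTIdx (x :: xs) 0 = 0 :: (pvTIdx xs 0).map (· + 1) := by
        simp [pvTIdx, hx, show (0:Int) + 1 = 1 from rfl, ← tIdx_shift]
      rw [ht]
      simp only [List.foldl_cons, PySem.List.insert_zero]
      rw [foldl_ins_map_succ _ s (-1) (tIdx_nonneg xs 0 le_rfl)]
      have hlen : s.length = (xs.filter (fun x => x != -1)).length := by
        simpa [List.filter_cons, hx] using h
      simp [pvMerge, hx, ih s hlen]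
    · have hlen : s.length = (xs.filter (fun x => x != -1)).length + 1 := by
        simp only [List.filter_cons] at h
        simp only [show (x != -1) = true by simpa using hx] at h
        simpa using h
      obtain ⟨y, ys, rfl⟩ : ∃ y ys, s = y :: ys := by
        cases s with
        | nil => simp at hlen
        | cons y ys => exact ⟨y, ys, rfl⟩
      have ht : pvTIdx (x :: xs) 0 = (pvTIdx xs 0).map (· + 1) := by
        simp [pvTIdx, hx, show (0:Int) + 1 = 1 from rfl, ← tIdx_shift]
      rw [ht, foldl_ins_map_succ _ ys y (tIdx_nonneg xs 0 le_rfl)]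
      have : ys.length = (xs.filter (fun x => x != -1)).length := by
        simpa using hlen
      simp [pvMerge, hx, ih ys this]

-- ===== VERDICT (by name: the statement is the Claim_ definition above) =====
theorem solution_spec : Claim_equal_solution := by
  intro a _
  unfold Spec_solution solution solution_alt
  rw [firstLoop_eq a 0 [] []]
  simp only [List.nil_append]
  rw [person_eq a [] [] (by rfl)]
  simp only [List.nil_append]
  exact secondLoop_eq a _ (by rw [PySem.List.length_sorted])
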